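-- pv_equiv track=rewrite | github.com/berengerbenam/Python | bn/3.py | moveDigit
-- ===== SOURCE A (Python) =====
-- def moveDigit(T):
--     # transformation de la chaine texte T en une liste
--     L = T.split()
--
--     # initialisation de la liste des mots qui ne contiennent aucun chiffre
--     L_without_digit = []
--
--     # initialisation de la liste des mots qui contiennent au moins un chiffre
--     L_with_digit = []
--
--     # parcourir les éléments de la liste L et rechercher les mots qui contiennent des chiffres
--     for word in L:
--         if digit_in_word(word):
--             L_with_digit.append(word)
--         else:
--             L_without_digit.append(word)
--
--     result = L_without_digit + L_with_digit
--
--     return result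
--
-- def digit_in_word(word):
--     # initialisation d'un compteur
--     counter = 0
--     for x in word:
--         if x.isdigit():
--             counter = counter + 1
--
--     if counter > 0:
--         return True
--     else:
--         return False
-- ===== SOURCE B (Python) =====
-- def moveDigit(T):
--     # single stable keyed sort: digit-free words (key False) first, orders preserved
--     return sorted(T.split(), key=lambda w: any(c.isdigit() for c in w))
-- ===== Notes on version B (the rewrite author's own statement) =====
-- stated objective: idiomatic
-- what changed: Replaces the explicit two-accumulator partition loop and the digit-counting helper by a single stable keyed sort (sorted with key = word contains a digit), whose stability yields the same order.
import Mathlib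
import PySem

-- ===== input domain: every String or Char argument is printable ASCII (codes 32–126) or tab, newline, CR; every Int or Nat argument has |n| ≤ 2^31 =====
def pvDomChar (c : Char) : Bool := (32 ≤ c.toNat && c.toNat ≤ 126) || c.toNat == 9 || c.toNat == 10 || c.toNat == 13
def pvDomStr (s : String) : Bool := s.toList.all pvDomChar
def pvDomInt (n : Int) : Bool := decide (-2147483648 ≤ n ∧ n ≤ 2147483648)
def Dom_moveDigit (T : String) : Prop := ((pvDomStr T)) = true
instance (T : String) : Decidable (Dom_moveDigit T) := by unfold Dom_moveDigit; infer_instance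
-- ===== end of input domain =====

-- B replaces A's explicit two-accumulator partition by one stable keyed sort (idiomatic, same result).

-- ===== PORT A =====
def digitInWord (word : String) : Bool :=
  let counter : Int :=
    word.toList.foldl (fun c x => if PySem.Chars.isdigit x then c + 1 else c) 0
  if counter > 0 then true else false

def moveDigit (T : String) : List String :=
  let L := PySem.Str.split₀ T
  let pair : List String × List String :=
    L.foldl (fun acc word =>
      if digitInWord word then (acc.1, acc.2 ++ [word]) else (acc.1 ++ [word], acc.2))
      ([], [])
  pair.1 ++ pair.2

-- ===== PORT B =====
def hasDigit (w : String) : Bool := w.toList.any PySem.Chars.isdigit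

def moveDigit_alt (T : String) : List String :=
  PySem.List.sorted (PySem.Str.split₀ T) hasDigit

-- ===== PRECONDITION & SPEC =====
def Spec_moveDigit (T : String) (out : List String) : Prop := out = moveDigit_alt T
instance (T : String) (out : List String) : Decidable (Spec_moveDigit T out) := by unfold Spec_moveDigit; infer_instance

-- ===== CLAIM (what is proved, stated in full; the proofs are below) =====
def Claim_equal_moveDigit : Prop := ∀ (T : String), Dom_moveDigit T → Spec_moveDigit T (moveDigit T)

-- ===== LEMMAS AND PROOFS =====

-- A's digit counter is positive iff some character is a digit
theorem counter_pos (l : List Char) (c : Int) (hc : 0 ≤ c) :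
    (0 < l.foldl (fun c x => if PySem.Chars.isdigit x then c + 1 else c) c) ↔
      (0 < c ∨ l.any PySem.Chars.isdigit = true) := by
  induction l generalizing c with
  | nil => simp
  | cons x l ih =>
    by_cases hx : PySem.Chars.isdigit x = true
    · simp only [List.foldl_cons, hx, if_true, List.any_cons, Bool.true_or]
      rw [ih _ (by omega)]
      constructor
      · intro _; exact Or.inr trivial
      · intro _; exact Or.inl (by omega)
    · simp only [List.foldl_cons, List.any_cons]
      rw [if_neg hx, ih _ hc]
      simp [hx]

theorem digitInWord_eq (w : String) : digitInWord w = hasDigit w := by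
  unfold digitInWord hasDigit
  by_cases h : w.toList.any PySem.Chars.isdigit = true
  · simp only [gt_iff_lt]
    rw [if_pos ((counter_pos w.toList 0 le_rfl).2 (Or.inr h))]
    exact h.symm
  · simp only [gt_iff_lt]
    rw [if_neg (fun hp => by rcases (counter_pos w.toList 0 le_rfl).1 hp with h' | h' <;> simp_all)]
    simp [h]

-- A's loop produces the two filters
theorem loopA (l : List String) (a b : List String) :
    l.foldl (fun acc word =>
      if digitInWord word then (acc.1, acc.2 ++ [word]) else (acc.1 ++ [word], acc.2))
      (a, b)
    = (a ++ l.filter (fun w => !hasDigit w), b ++ l.filter hasDigit) := by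
  induction l generalizing a b with
  | nil => simp
  | cons x l ih =>
    by_cases hx : digitInWord x = true <;>
      [skip; skip] <;>
      · have hx' := (digitInWord_eq x) ▸ hx
        simp [hx, ih, List.filter_cons, hx']

-- inserting x into a0 ++ a1 where x goes after all of a0 and before all of a1
theorem insertBy_append_mid (before : String → String → Bool) (x : String)
    (a0 a1 : List String) (h0 : ∀ y ∈ a0, before x y = false)
    (h1 : ∀ y ∈ a1, before x y = true) :
    PySem.List.insertBy before x (a0 ++ a1) = a0 ++ x :: a1 := by
  induction a0 with
  | nil =>
    cases a1 with
    | nil => simp [PySem.List.insertBy]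
    | cons y ys => simp [PySem.List.insertBy, h1 y (by simp)]
  | cons z a0 ih =>
    have hz : before x z = false := h0 z (by simp)
    simp only [List.cons_append, PySem.List.insertBy, hz]
    simp [ih (fun y hy => h0 y (by simp [hy]))]

-- B's stable insertion sort with the Bool key partitions: digit-free words first
theorem loopB (l : List String) (a0 a1 : List String)
    (h0 : ∀ w ∈ a0, hasDigit w = false) (h1 : ∀ w ∈ a1, hasDigit w = true) :
    l.foldl (fun acc x =>
        PySem.List.insertBy (fun a b => decide (hasDigit a < hasDigit b)) x acc)
      (a0 ++ a1)
    = (a0 ++ l.filter (fun w => !hasDigit w)) ++ (a1 ++ l.filter hasDigit) := by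
  induction l generalizing a0 a1 with
  | nil => simp
  | cons x l ih =>
    by_cases hx : hasDigit x = true
    · have hins : PySem.List.insertBy (fun a b => decide (hasDigit a < hasDigit b)) x (a0 ++ a1)
          = (a0 ++ a1) ++ [x] := by
        apply PySem.List.insertBy_of_forall_not_before
        intro y _
        cases hy : hasDigit y <;> simp [hx]
      simp only [List.foldl_cons, hins, List.append_assoc]
      rw [ih a0 (a1 ++ [x]) h0 (by intro w hw; rcases List.mem_append.1 hw with h | h
                                   · exact h1 w h
                                   · simp at h; subst h; exact hx)]
      simp [hx]
    · have hx' : hasDigit x = false := by simpa using hx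
      have hins : PySem.List.insertBy (fun a b => decide (hasDigit a < hasDigit b)) x (a0 ++ a1)
          = a0 ++ x :: a1 := by
        apply insertBy_append_mid
        · intro y hy; simp [hx', h0 y hy]
        · intro y hy; simp [hx', h1 y hy]
      have : a0 ++ x :: a1 = (a0 ++ [x]) ++ a1 := by simp
      simp only [List.foldl_cons, hins, this]
      rw [ih (a0 ++ [x]) a1 (by intro w hw; rcases List.mem_append.1 hw with h | h
                                · exact h0 w h
                                · simp at h; subst h; exact hx') h1]
      simp [hx']

-- ===== VERDICT (by name: the statement is the Claim_ definition above) =====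
theorem moveDigit_spec : Claim_equal_moveDigit := by
  intro T _
  unfold Spec_moveDigit moveDigit moveDigit_alt
  have hB := loopB (PySem.Str.split₀ T) [] [] (by simp) (by simp)
  simp only [List.nil_append] at hB
  rw [PySem.List.sorted_eq_foldl_insertBy, hB]
  simp only [loopA, List.nil_append]
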